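-- pv_equiv track=rewrite | github.com/rodmhgl/dbu | teams-management/teams-operator/teams_operator.py | sanitize_namespace_name
-- ===== SOURCE A (Python) =====
-- def sanitize_namespace_name(team_name: str) -> str:
--     """Convert team name to valid Kubernetes namespace name"""
--     # Lowercase, replace spaces/special chars with hyphens, remove consecutive hyphens
--     namespace = team_name.lower()
--     namespace = ''.join(c if c.isalnum() else '-' for c in namespace)
--     namespace = '-'.join(filter(None, namespace.split('-')))  # Remove consecutive hyphens
--
--     # Ensure it starts and ends with alphanumeric
--     namespace = namespace.strip('-')
--
--     # Kubernetes namespace names must be <= 63 characters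
--     if len(namespace) > 63:
--         namespace = namespace[:63].rstrip('-')
--
--     # Add prefix to avoid conflicts
--     namespace = f"team-{namespace}"
--
--     return namespace
-- ===== SOURCE B (Python) =====
-- def sanitize_namespace_name(team_name: str) -> str:
--     """Convert team name to valid Kubernetes namespace name (single-pass scan)."""
--     out = []
--     for c in team_name.lower():
--         if c.isalnum():
--             out.append(c)
--         elif out and out[-1] != '-':
--             out.append('-')
--     # the scan leaves at most one trailing hyphen; drop it
--     if out and out[-1] == '-':
--         out.pop()
--     if len(out) > 63:
--         del out[63:]
--         while out and out[-1] == '-':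
--             out.pop()
--     return "team-" + "".join(out)
-- ===== Notes on version B (the rewrite author's own statement) =====
-- stated objective: alternative
-- what changed: Replaces A's multi-pass map/split/filter/join/strip pipeline with a single stateful left-to-right scan that emits alphanumeric chars and collapses runs of other chars to one interior hyphen, then drops the single possible trailing hyphen.
import Mathlib
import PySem

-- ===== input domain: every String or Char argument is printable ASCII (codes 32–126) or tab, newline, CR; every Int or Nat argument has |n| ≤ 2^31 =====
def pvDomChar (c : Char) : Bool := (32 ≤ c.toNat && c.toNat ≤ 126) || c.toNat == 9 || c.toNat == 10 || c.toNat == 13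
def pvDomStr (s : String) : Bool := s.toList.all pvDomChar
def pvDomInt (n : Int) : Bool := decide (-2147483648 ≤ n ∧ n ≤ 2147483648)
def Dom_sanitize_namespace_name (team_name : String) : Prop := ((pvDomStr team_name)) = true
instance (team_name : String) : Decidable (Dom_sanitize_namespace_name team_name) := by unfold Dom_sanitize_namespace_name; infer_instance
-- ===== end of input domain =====

-- B replaces A's multi-pass map/split/filter/join/strip pipeline with a single stateful scan (alternative decomposition, same O(n) cost).

-- ===== PORT A =====
-- hand port of s.rstrip('-') (PySem has no per-char rstrip): drop trailing '-' chars; exact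
def pvRstripHyphen (cs : List Char) : List Char :=
  (cs.reverse.dropWhile (fun c => c == '-')).reverse

-- 'if len(namespace) > 63: namespace = namespace[:63].rstrip("-")'
def pvTruncA (ns : List Char) : List Char :=
  if ns.length > 63 then pvRstripHyphen (PySem.Chars.slice ns none (some 63)) else ns

def sanitize_namespace_name (team_name : String) : String :=
  String.ofList ("team-".toList ++
    pvTruncA (PySem.Chars.stripChars
      (PySem.Chars.join ['-']
        ((PySem.Chars.splitOn
            ((PySem.Chars.lower team_name.toList).map
              (fun c => if PySem.Chars.isalnum c then c else '-')) ['-']).filter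
          (fun p => !p.isEmpty)))
      ['-']))

-- ===== PORT B =====
-- 'while out and out[-1] == "-": out.pop()' as a recursion popping the last element
def pvPopTrailing (cs : List Char) : List Char :=
  if h : cs.getLast? = some '-' then pvPopTrailing cs.dropLast else cs
termination_by cs.length
decreasing_by
  cases cs with
  | nil => simp at h
  | cons a t => simp [List.length_dropLast]

-- 'if out and out[-1] == "-": out.pop()'  (drop the single possible trailing hyphen)
def pvFixB (out : List Char) : List Char :=
  if out.getLast? = some '-' then out.dropLast else out

-- 'if len(out) > 63: del out[63:]; while out and out[-1] == "-": out.pop()'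
def pvTruncB (out : List Char) : List Char :=
  if out.length > 63 then pvPopTrailing (out.take 63) else out

def sanitize_namespace_name_alt (team_name : String) : String :=
  String.ofList ("team-".toList ++
    pvTruncB (pvFixB ((PySem.Chars.lower team_name.toList).foldl
      (fun acc c =>
        if PySem.Chars.isalnum c then acc ++ [c]
        else if acc ≠ [] ∧ acc.getLast? ≠ some '-' then acc ++ ['-'] else acc) [])))

-- ===== PRECONDITION & SPEC =====
def Spec_sanitize_namespace_name (team_name : String) (out : String) : Prop := out = sanitize_namespace_name_alt team_name
instance (team_name : String) (out : String) : Decidable (Spec_sanitize_namespace_name team_name out) := by unfold Spec_sanitize_namespace_name; infer_instance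

-- ===== CLAIM (what is proved, stated in full; the proofs are below) =====
def Claim_equal_sanitize_namespace_name : Prop := ∀ (team_name : String), Dom_sanitize_namespace_name team_name → Spec_sanitize_namespace_name team_name (sanitize_namespace_name team_name)

-- ===== LEMMAS AND PROOFS =====

-- canonical collapsed form of the hyphen-mapped string; flag = "a separating hyphen may be emitted"
def pvCf : List Char → Bool → List Char
  | [], _ => []
  | c :: r, b =>
    if c = '-' then
      (if b then (if pvCf r false = [] then [] else '-' :: pvCf r false) else pvCf r false)
    else c :: pvCf r true

-- B's scan as a function of the remaining input and the hyphen flag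
def pvG : List Char → Bool → List Char
  | [], _ => []
  | c :: r, b =>
    if PySem.Chars.isalnum c then c :: pvG r true
    else (if b then '-' :: pvG r false else pvG r false)

lemma pvIsalnum_ne_hyphen {c : Char} (h : PySem.Chars.isalnum c = true) : c ≠ '-' := by
  rintro rfl; exact absurd h (by decide)

lemma pvFixB_cons_ne {c : Char} (hc : c ≠ '-') (l : List Char) :
    pvFixB (c :: l) = c :: pvFixB l := by
  cases l with
  | nil => simp [pvFixB, hc]
  | cons x xs =>
    simp only [pvFixB, List.getLast?_cons_cons, List.dropLast_cons₂]
    split_ifs <;> rfl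

lemma pvFixB_hyphen_cons {l : List Char} (hl : l ≠ []) :
    pvFixB ('-' :: l) = '-' :: pvFixB l := by
  cases l with
  | nil => exact absurd rfl hl
  | cons x xs =>
    simp only [pvFixB, List.getLast?_cons_cons, List.dropLast_cons₂]
    split_ifs <;> rfl

lemma pvFixB_hyphen_nil : pvFixB ['-'] = [] := by simp [pvFixB]

-- B's fold equals pvG
lemma pvFoldl_eq_g (cs : List Char) : ∀ acc : List Char,
    cs.foldl (fun acc c =>
      if PySem.Chars.isalnum c then acc ++ [c]
      else if acc ≠ [] ∧ acc.getLast? ≠ some '-' then acc ++ ['-'] else acc) acc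
    = acc ++ pvG cs (decide (acc ≠ [] ∧ acc.getLast? ≠ some '-')) := by
  induction cs with
  | nil => intro acc; simp [pvG]
  | cons c r ih =>
    intro acc
    simp only [List.foldl_cons]
    by_cases hc : PySem.Chars.isalnum c = true
    · have hc' : c ≠ '-' := pvIsalnum_ne_hyphen hc
      rw [if_pos hc, ih]
      have h1 : (decide ((acc ++ [c]) ≠ [] ∧ (acc ++ [c]).getLast? ≠ some '-')) = true := by
        simp [hc']
      rw [h1]
      simp [pvG, hc, List.append_assoc]
    · have hcf : PySem.Chars.isalnum c = false := by
        revert hc; cases (PySem.Chars.isalnum c) <;> simp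
      rw [if_neg hc]
      by_cases hb : acc ≠ [] ∧ acc.getLast? ≠ some '-'
      · rw [if_pos hb, ih]
        have h1 : (decide ((acc ++ ['-']) ≠ [] ∧ (acc ++ ['-']).getLast? ≠ some '-')) = false := by
          simp
        rw [h1, decide_eq_true hb]
        simp [pvG, hcf, List.append_assoc]
      · rw [if_neg hb, ih, decide_eq_false hb]
        simp [pvG, hcf]

-- main bridge: single-pop of B's scan result = canonical form of the hyphen-mapped list
lemma pvMain (cs : List Char) :
    (pvFixB (pvG cs false) = pvCf (cs.map (fun c => if PySem.Chars.isalnum c then c else '-')) false)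
  ∧ (pvFixB (pvG cs true) = pvCf (cs.map (fun c => if PySem.Chars.isalnum c then c else '-')) true)
  ∧ (pvG cs false = [] ↔ pvCf (cs.map (fun c => if PySem.Chars.isalnum c then c else '-')) false = []) := by
  induction cs with
  | nil => refine ⟨by simp [pvG, pvCf, pvFixB], by simp [pvG, pvCf, pvFixB], by simp [pvG, pvCf]⟩
  | cons c r ih =>
    obtain ⟨ih1, ih2, ih3⟩ := ih
    by_cases hc : PySem.Chars.isalnum c = true
    · have hc' : c ≠ '-' := pvIsalnum_ne_hyphen hc
      have hmap : (c :: r).map (fun c => if PySem.Chars.isalnum c then c else '-')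
          = c :: r.map (fun c => if PySem.Chars.isalnum c then c else '-') := by simp [hc]
      refine ⟨?_, ?_, ?_⟩ <;> rw [hmap]
      · rw [show pvG (c :: r) false = c :: pvG r true from by simp [pvG, hc]]
        rw [show pvCf (c :: r.map (fun c => if PySem.Chars.isalnum c then c else '-')) false
            = c :: pvCf (r.map (fun c => if PySem.Chars.isalnum c then c else '-')) true from by
          simp [pvCf, hc']]
        rw [pvFixB_cons_ne hc', ih2]
      · rw [show pvG (c :: r) true = c :: pvG r true from by simp [pvG, hc]]
        rw [show pvCf (c :: r.map (fun c => if PySem.Chars.isalnum c then c else '-')) true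
            = c :: pvCf (r.map (fun c => if PySem.Chars.isalnum c then c else '-')) true from by
          simp [pvCf, hc']]
        rw [pvFixB_cons_ne hc', ih2]
      · simp [pvG, pvCf, hc, hc']
    · have hcf : PySem.Chars.isalnum c = false := by
        revert hc; cases (PySem.Chars.isalnum c) <;> simp
      have hmap : (c :: r).map (fun c => if PySem.Chars.isalnum c then c else '-')
          = '-' :: r.map (fun c => if PySem.Chars.isalnum c then c else '-') := by simp [hcf]
      refine ⟨?_, ?_, ?_⟩ <;> rw [hmap]
      · rw [show pvG (c :: r) false = pvG r false from by simp [pvG, hcf]]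
        rw [show pvCf ('-' :: r.map (fun c => if PySem.Chars.isalnum c then c else '-')) false
            = pvCf (r.map (fun c => if PySem.Chars.isalnum c then c else '-')) false from by
          simp [pvCf]]
        exact ih1
      · rw [show pvG (c :: r) true = '-' :: pvG r false from by simp [pvG, hcf]]
        rw [show pvCf ('-' :: r.map (fun c => if PySem.Chars.isalnum c then c else '-')) true
            = (if pvCf (r.map (fun c => if PySem.Chars.isalnum c then c else '-')) false = [] then []
               else '-' :: pvCf (r.map (fun c => if PySem.Chars.isalnum c then c else '-')) false) from by
          simp [pvCf]]
        by_cases hz : pvG r false = []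
        · rw [hz, if_pos (ih3.mp hz)]
          exact pvFixB_hyphen_nil
        · rw [pvFixB_hyphen_cons hz, ih1, if_neg (fun h0 => hz (ih3.mpr h0))]
      · rw [show pvG (c :: r) false = pvG r false from by simp [pvG, hcf]]
        rw [show pvCf ('-' :: r.map (fun c => if PySem.Chars.isalnum c then c else '-')) false
            = pvCf (r.map (fun c => if PySem.Chars.isalnum c then c else '-')) false from by
          simp [pvCf]]
        exact ih3

-- A-side: PySem.Chars.splitOn with the one-char separator ['-'] is List.splitOn
lemma pvSplit_exists (s : List Char) : ∃ p ps, s.splitOn '-' = p :: ps := by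
  have hne : s.splitOn '-' ≠ [] := List.splitOnP_ne_nil _ s
  cases h' : s.splitOn '-' with
  | nil => exact absurd h' hne
  | cons a b => exact ⟨a, b, rfl⟩

lemma pvSplitOn_go (fuel : Nat) : ∀ (l cur : List Char) (acc : List (List Char)), l.length < fuel →
    PySem.Chars.splitOn.go ['-'] fuel l cur acc
      = acc.reverse ++ (l.splitOn '-').modifyHead (fun x => cur.reverse ++ x) := by
  induction fuel with
  | zero => intro l cur acc h; exact absurd h (Nat.not_lt_zero _)
  | succ n ih =>
    intro l cur acc h
    cases l with
    | nil =>
      rw [show PySem.Chars.splitOn.go ['-'] (n+1) [] cur acc = (cur.reverse :: acc).reverse from rfl]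
      rw [List.splitOn_nil]
      simp
    | cons c rest =>
      rw [show PySem.Chars.splitOn.go ['-'] (n+1) (c :: rest) cur acc
          = (if ['-'].isPrefixOf (c :: rest) then
               PySem.Chars.splitOn.go ['-'] n (List.drop 1 (c :: rest)) [] (cur.reverse :: acc)
             else PySem.Chars.splitOn.go ['-'] n rest (c :: cur) acc) from rfl]
      have hlen : rest.length < n := by
        have := Nat.lt_of_succ_lt_succ h
        simpa using this
      by_cases hcm : c = '-'
      · subst hcm
        rw [if_pos (by simp [List.isPrefixOf])]
        rw [show List.drop 1 ('-' :: rest) = rest from rfl]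
        rw [ih rest [] (cur.reverse :: acc) hlen]
        have hsp : ('-' :: rest).splitOn '-' = [] :: rest.splitOn '-' := by
          simp [List.splitOn, List.splitOnP_cons]
        rw [hsp]
        obtain ⟨p, ps, hps⟩ := pvSplit_exists rest
        rw [hps]
        simp
      · rw [if_neg (by simp [List.isPrefixOf]; exact fun hh => hcm hh.symm)]
        rw [ih rest (c :: cur) acc hlen]
        have hb : (c == '-') = false := by simp [hcm]
        have hsp : (c :: rest).splitOn '-' = (rest.splitOn '-').modifyHead (List.cons c) := by
          simp [List.splitOn, List.splitOnP_cons, hb]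
        rw [hsp]
        obtain ⟨p, ps, hps⟩ := pvSplit_exists rest
        rw [hps]
        simp

lemma pvSplitOn_eq (s : List Char) : PySem.Chars.splitOn s ['-'] = s.splitOn '-' := by
  rw [show PySem.Chars.splitOn s ['-'] = PySem.Chars.splitOn.go ['-'] (s.length + 1) s [] [] from rfl]
  rw [pvSplitOn_go (s.length + 1) s [] [] (Nat.lt_succ_self _)]
  obtain ⟨p, ps, hps⟩ := pvSplit_exists s
  rw [hps]
  simp

lemma pvJoin_ne_nil (l : List (List Char)) (h : l.filter (fun p => !p.isEmpty) ≠ []) :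
    PySem.Chars.join ['-'] (l.filter (fun p => !p.isEmpty)) ≠ [] := by
  cases hf : l.filter (fun p => !p.isEmpty) with
  | nil => exact absurd hf h
  | cons q t =>
    have hq : q ≠ [] := by
      have hmem : q ∈ l.filter (fun p => !p.isEmpty) := by
        rw [hf]; exact List.mem_cons_self
      have := List.of_mem_filter hmem
      simpa using this
    cases t with
    | nil => rw [PySem.Chars.join_singleton]; exact hq
    | cons b t' => rw [PySem.Chars.join_cons_cons]; simp

-- A-side pipeline equals pvCf
lemma pvA1 (s : List Char) :
    (PySem.Chars.join ['-'] ((s.splitOn '-').filter (fun p => !p.isEmpty)) = pvCf s false)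
  ∧ (∀ p ps, s.splitOn '-' = p :: ps →
      p ++ (if ps.filter (fun q => !q.isEmpty) = [] then []
            else '-' :: PySem.Chars.join ['-'] (ps.filter (fun q => !q.isEmpty))) = pvCf s true) := by
  induction s with
  | nil =>
    constructor
    · simp [List.splitOn_nil, PySem.Chars.join_nil, pvCf]
    · intro p ps h
      rw [List.splitOn_nil] at h
      injection h with h1 h2
      subst h1; subst h2
      simp [pvCf]
  | cons c s ih =>
    obtain ⟨ih1, ih2⟩ := ih
    by_cases hcm : c = '-'
    · subst hcm
      have hsp : ('-' :: s).splitOn '-' = [] :: s.splitOn '-' := by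
        simp [List.splitOn, List.splitOnP_cons]
      constructor
      · rw [hsp]
        have hfl : ([] :: s.splitOn '-').filter (fun p => !p.isEmpty)
            = (s.splitOn '-').filter (fun p => !p.isEmpty) := by simp
        rw [hfl, ih1]
        simp [pvCf]
      · intro p ps h
        rw [hsp] at h
        injection h with h1 h2
        subst h1; subst h2
        rw [List.nil_append]
        by_cases hfe : (s.splitOn '-').filter (fun q => !q.isEmpty) = []
        · rw [if_pos hfe]
          have hz : pvCf s false = [] := by rw [← ih1, hfe, PySem.Chars.join_nil]
          simp [pvCf, hz]
        · rw [if_neg hfe, ih1]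
          have hne : pvCf s false ≠ [] := by rw [← ih1]; exact pvJoin_ne_nil _ hfe
          simp [pvCf, hne]
    · have hb : (c == '-') = false := by simp [hcm]
      have hsp : (c :: s).splitOn '-' = (s.splitOn '-').modifyHead (List.cons c) := by
        simp [List.splitOn, List.splitOnP_cons, hb]
      obtain ⟨p, ps, hps⟩ := pvSplit_exists s
      have hs2 : (c :: s).splitOn '-' = (c :: p) :: ps := by rw [hsp, hps]; rfl
      constructor
      · rw [hs2]
        have hfl : ((c :: p) :: ps).filter (fun q => !q.isEmpty)
            = (c :: p) :: ps.filter (fun q => !q.isEmpty) := by simp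
        rw [hfl]
        have hK := ih2 p ps hps
        rw [show pvCf (c :: s) false = c :: pvCf s true from by simp [pvCf, hcm]]
        cases hf : ps.filter (fun q => !q.isEmpty) with
        | nil =>
          rw [hf] at hK
          rw [if_pos rfl, List.append_nil] at hK
          rw [PySem.Chars.join_singleton, hK]
        | cons q t =>
          rw [hf] at hK
          rw [if_neg (by simp)] at hK
          rw [PySem.Chars.join_cons_cons, ← hK]
          simp
      · intro p' ps' h
        rw [hs2] at h
        injection h with h1 h2
        subst h1; subst h2
        rw [show pvCf (c :: s) true = c :: pvCf s true from by simp [pvCf, hcm]]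
        rw [← ih2 p ps hps]
        simp

-- pvCf never starts (flag false) or ends with '-'
lemma pvCf_head (s : List Char) : (pvCf s false).head? ≠ some '-' := by
  induction s with
  | nil => simp [pvCf]
  | cons c r ih =>
    by_cases hcm : c = '-'
    · subst hcm; simpa [pvCf] using ih
    · simp [pvCf, hcm]

lemma pvCf_last (s : List Char) : ∀ b, (pvCf s b).getLast? ≠ some '-' := by
  induction s with
  | nil => intro b; simp [pvCf]
  | cons c r ih =>
    intro b
    by_cases hcm : c = '-'
    · subst hcm
      cases b
      · simpa [pvCf] using ih false
      · by_cases hz : pvCf r false = []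
        · simp [pvCf, hz]
        · cases h' : pvCf r false with
          | nil => exact absurd h' hz
          | cons x xs =>
            rw [show pvCf ('-' :: r) true = '-' :: x :: xs from by simp [pvCf, h']]
            rw [List.getLast?_cons_cons]
            have := ih false
            rw [h'] at this
            exact this
    · cases h' : pvCf r true with
      | nil =>
        rw [show pvCf (c :: r) b = c :: pvCf r true from by simp [pvCf, hcm], h']
        simp [hcm]
      | cons x xs =>
        rw [show pvCf (c :: r) b = c :: pvCf r true from by simp [pvCf, hcm], h',
          List.getLast?_cons_cons]
        have := ih true
        rw [h'] at this
        exact this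

lemma pvStrip_noop (l : List Char) (h1 : l.head? ≠ some '-') (h2 : l.getLast? ≠ some '-') :
    PySem.Chars.stripChars l ['-'] = l := by
  have hp : ∀ a : Char, a ≠ '-' → (List.contains ['-'] a) = false := by
    intro a ha; simp [ha]
  show (List.dropWhile (fun c => List.contains ['-'] c)
      (List.dropWhile (fun c => List.contains ['-'] c) l).reverse).reverse = l
  have hL : List.dropWhile (fun c => List.contains ['-'] c) l = l := by
    cases l with
    | nil => rfl
    | cons a t =>
      have ha : a ≠ '-' := by
        intro he; exact h1 (by rw [he]; rfl)
      simp only [List.dropWhile_cons]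
      rw [hp a ha]
      simp
  rw [hL]
  cases hr : l.reverse with
  | nil =>
    have : l = [] := by simpa using congrArg List.reverse hr
    subst this; rfl
  | cons a t =>
    have ha : a ≠ '-' := by
      intro he
      apply h2
      rw [← List.head?_reverse, hr, he]
      rfl
    simp only [List.dropWhile_cons]
    rw [hp a ha]
    rw [if_neg (by simp)]
    rw [← hr, List.reverse_reverse]

lemma pvPop_eq_rstrip (cs : List Char) : pvPopTrailing cs = pvRstripHyphen cs := by
  induction cs using List.reverseRecOn with
  | nil => rw [pvPopTrailing]; rfl
  | append_singleton l a ih =>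
    rw [pvPopTrailing]
    by_cases ha : a = '-'
    · subst ha
      rw [dif_pos List.getLast?_concat, List.dropLast_concat, ih]
      unfold pvRstripHyphen
      rw [List.reverse_append]
      simp
    · rw [dif_neg (by rw [List.getLast?_concat]; simp [ha])]
      unfold pvRstripHyphen
      rw [List.reverse_append]
      simp [ha]

-- ===== VERDICT (by name: the statement is the Claim_ definition above) =====
theorem sanitize_namespace_name_spec : Claim_equal_sanitize_namespace_name := by
  intro t _
  unfold Spec_sanitize_namespace_name sanitize_namespace_name sanitize_namespace_name_alt
  have key : ∀ cs : List Char,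
      pvTruncA (PySem.Chars.stripChars
        (PySem.Chars.join ['-']
          ((PySem.Chars.splitOn (cs.map (fun c => if PySem.Chars.isalnum c then c else '-')) ['-']).filter
            (fun p => !p.isEmpty))) ['-'])
      = pvTruncB (pvFixB (cs.foldl
          (fun acc c =>
            if PySem.Chars.isalnum c then acc ++ [c]
            else if acc ≠ [] ∧ acc.getLast? ≠ some '-' then acc ++ ['-'] else acc) [])) := by
    intro cs
    rw [pvSplitOn_eq, (pvA1 _).1, pvStrip_noop _ (pvCf_head _) (pvCf_last _ _)]
    rw [pvFoldl_eq_g]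
    rw [show (decide ((([] : List Char) ≠ []) ∧ (([] : List Char).getLast? ≠ some '-'))) = false from by decide]
    rw [List.nil_append, (pvMain cs).1]
    unfold pvTruncA pvTruncB
    rw [pvPop_eq_rstrip, PySem.Chars.slice_eq_listSlice,
      PySem.List.slice_to _ (by norm_num : (0:Int) ≤ 63)]
    rfl
  rw [key]
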